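-- pv_equiv track=rewrite | github.com/chango01/python-hackerrank | counting_valleys.py | suma_valles
-- ===== SOURCE A (Python) =====
-- def suma_valles(n,lista):               # función, entra longitud y valores del string.
--     sea=0                               # variables sea que cuenta el recorrido y suma los valles.
--     suma=0
--     for i in range(n):
--         if lista[i]=="U" and sea!=-1:
--             sea+=1
--         elif lista[i]=="U" and sea==-1:
--             sea+=1
--             suma+=1
--         elif lista[i]=="D":
--             sea-=1
--         else:
--             continue
--     return suma
-- ===== SOURCE B (Python) =====
-- def suma_valles(n, lista):
--     # Build the running-altitude sequence (starting at 0) over the first n steps,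
--     # then count the -1 -> 0 up-crossings: each one exits exactly one valley.
--     alts = [0]
--     a = 0
--     for c in lista[:max(n, 0)]:
--         a += 1 if c == "U" else -1 if c == "D" else 0
--         alts.append(a)
--     return sum(1 for prev, cur in zip(alts, alts[1:]) if prev == -1 and cur == 0)
-- ===== Notes on version B (the rewrite author's own statement) =====
-- stated objective: alternative
-- what changed: Replaces A's one-pass four-branch state machine (altitude plus in-loop valley counter) by a two-pass prefix-sum formulation: build the running-altitude sequence, then count adjacent (-1,0) pairs, i.e. the up-crossings of sea level.
import Mathlib
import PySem

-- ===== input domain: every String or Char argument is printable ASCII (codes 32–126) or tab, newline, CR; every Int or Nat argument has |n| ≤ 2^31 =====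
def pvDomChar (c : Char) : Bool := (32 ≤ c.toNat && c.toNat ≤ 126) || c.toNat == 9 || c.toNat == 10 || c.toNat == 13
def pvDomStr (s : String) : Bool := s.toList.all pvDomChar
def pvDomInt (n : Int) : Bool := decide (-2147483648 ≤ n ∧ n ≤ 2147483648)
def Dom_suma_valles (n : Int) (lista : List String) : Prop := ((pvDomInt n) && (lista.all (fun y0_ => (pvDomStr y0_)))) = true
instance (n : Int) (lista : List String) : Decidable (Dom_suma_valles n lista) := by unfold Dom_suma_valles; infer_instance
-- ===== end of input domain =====

-- B replaces A's one-pass four-branch state machine by a two-pass prefix-sum formulation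
-- (running altitudes, then count the (-1,0) adjacent pairs); alternative decomposition, same cost.

-- ===== PORT A =====
-- literal transliteration of A: fold over range(n), state (sea, suma), same branch order
def suma_valles (n : Int) (lista : List String) : Int :=
  let r := (PySem.List.pyRange 0 n 1).foldl
    (fun (st : Int × Int) i =>
      let c := PySem.List.pyGetD lista i ""
      if c = "U" ∧ st.1 ≠ -1 then (st.1 + 1, st.2)
      else if c = "U" ∧ st.1 = -1 then (st.1 + 1, st.2 + 1)
      else if c = "D" then (st.1 - 1, st.2)
      else st)
    (0, 0)
  r.2

-- ===== PORT B =====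
-- literal transliteration of Source B: build the altitude list, then count (-1, 0) adjacent pairs
def suma_valles_alt (n : Int) (lista : List String) : Int :=
  let st := (PySem.List.slice lista none (some (max n 0))).foldl
    (fun (st : List Int × Int) c =>
      let a := st.2 + (if c = "U" then 1 else if c = "D" then -1 else 0)
      (st.1 ++ [a], a))
    ([0], 0)
  let alts := st.1
  (alts.zip alts.tail).foldl
    (fun s p => s + (if p.1 = -1 ∧ p.2 = 0 then 1 else 0)) 0

-- ===== PRECONDITION & SPEC =====
-- Pre_ excludes exactly the inputs where A raises IndexError: n beyond the list length.
def Pre_suma_valles (n : Int) (lista : List String) : Prop := n ≤ (lista.length : Int)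
instance (n : Int) (lista : List String) : Decidable (Pre_suma_valles n lista) := by
  unfold Pre_suma_valles; infer_instance
def pvWitness_suma_valles : Int × List String := (4, ["U", "D", "D", "U"])

def Spec_suma_valles (n : Int) (lista : List String) (out : Int) : Prop := out = suma_valles_alt n lista
instance (n : Int) (lista : List String) (out : Int) : Decidable (Spec_suma_valles n lista out) := by unfold Spec_suma_valles; infer_instance

-- ===== CLAIM (what is proved, stated in full; the proofs are below) =====
def Claim_equal_suma_valles : Prop := ∀ (n : Int) (lista : List String), Dom_suma_valles n lista → Pre_suma_valles n lista → Spec_suma_valles n lista (suma_valles n lista)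

-- ===== LEMMAS AND PROOFS =====

-- step delta of one character
def svDelta (c : String) : Int := if c = "U" then 1 else if c = "D" then -1 else 0

-- A's loop body as a function of the character
def svStepA (st : Int × Int) (c : String) : Int × Int :=
  if c = "U" ∧ st.1 ≠ -1 then (st.1 + 1, st.2)
  else if c = "U" ∧ st.1 = -1 then (st.1 + 1, st.2 + 1)
  else if c = "D" then (st.1 - 1, st.2)
  else st

-- B's loop body
def svStepB (st : List Int × Int) (c : String) : List Int × Int :=
  let a := st.2 + (if c = "U" then 1 else if c = "D" then -1 else 0)
  (st.1 ++ [a], a)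

-- number of -1 -> 0 up-crossings starting at altitude a
def svCC (a : Int) : List String → Int
  | [] => 0
  | c :: cs => (if a = -1 ∧ a + svDelta c = 0 then 1 else 0) + svCC (a + svDelta c) cs

-- tail of the altitude scan / the altitude scan itself (head is definitionally the seed)
def svScanTail (a : Int) : List String → List Int
  | [] => []
  | c :: cs => (a + svDelta c) :: svScanTail (a + svDelta c) cs

def svScan (a : Int) (cs : List String) : List Int := a :: svScanTail a cs

-- the pair-count pass of B
def svPC (xs : List Int) : Int :=
  (xs.zip xs.tail).foldl (fun s p => s + (if p.1 = -1 ∧ p.2 = 0 then 1 else 0)) 0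

lemma svScan_cons (a : Int) (c : String) (cs : List String) :
    svScan a (c :: cs) = a :: svScan (a + svDelta c) cs := rfl

-- A's fold computes (final altitude, suma + crossings)
lemma svFoldA (cs : List String) : ∀ sea suma : Int,
    cs.foldl svStepA (sea, suma) = (sea + (cs.map svDelta).sum, suma + svCC sea cs) := by
  induction cs with
  | nil => intro sea suma; simp [svCC]
  | cons c cs ih =>
    intro sea suma
    by_cases hU : c = "U"
    · by_cases h1 : sea = -1
      · simp [svStepA, hU, h1, ih, svCC, svDelta]; ring
      · simp [svStepA, hU, h1, ih, svCC, svDelta]; ring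
    · by_cases hD : c = "D"
      · simp [svStepA, hD, ih, svCC, svDelta]
        exact ⟨by ring, by rw [if_neg (by omega)]; ring⟩
      · simp [svStepA, hU, hD, ih, svCC, svDelta]
        omega

-- B's fold builds the altitude scan
lemma svFoldB (cs : List String) : ∀ (p : List Int) (a : Int),
    (cs.foldl svStepB (p ++ [a], a)).1 = p ++ svScan a cs := by
  induction cs with
  | nil => intro p a; simp [svScan, svScanTail]
  | cons c cs ih =>
    intro p a
    have h : svStepB (p ++ [a], a) c = ((p ++ [a]) ++ [a + svDelta c], a + svDelta c) := by
      simp [svStepB, svDelta]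
    rw [List.foldl_cons, h, ih (p ++ [a]) (a + svDelta c), svScan_cons]
    simp

lemma svPC_cons (a b : Int) (t : List Int) :
    svPC (a :: b :: t) = (if a = -1 ∧ b = 0 then 1 else 0) + svPC (b :: t) := by
  unfold svPC
  simp only [List.tail_cons, List.zip_cons_cons, List.foldl_cons, Int.zero_add]
  rw [PySem.List.foldl_add, PySem.List.foldl_add]
  ring

-- the pair count of a scan is the crossing count
lemma svPC_scan (cs : List String) : ∀ a : Int, svPC (svScan a cs) = svCC a cs := by
  induction cs with
  | nil => intro a; simp [svScan, svScanTail, svPC, svCC]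
  | cons c cs ih =>
    intro a
    rw [svScan_cons, show svScan (a + svDelta c) cs = (a + svDelta c) :: svScanTail (a + svDelta c) cs from rfl]
    rw [svPC_cons]
    rw [show (a + svDelta c) :: svScanTail (a + svDelta c) cs = svScan (a + svDelta c) cs from rfl, ih]
    simp [svCC]

-- the range-indexed fold of A equals a fold over the taken prefix
lemma svFoldRange (lista : List String) : ∀ (k : Nat), k ≤ lista.length →
    List.foldl (fun (st : Int × Int) (i : Int) => svStepA st (PySem.List.pyGetD lista i ""))
        (0, 0) (PySem.List.pyRange 0 (k : Int) 1)
      = List.foldl svStepA (0, 0) (lista.take k) := by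
  intro k
  induction k with
  | zero => intro _; rw [PySem.List.pyRange_one_eq_nil (by omega)]; simp
  | succ k ih =>
    intro h
    have hcast : ((k + 1 : Nat) : Int) = (k : Int) + 1 := by push_cast; ring
    rw [hcast, PySem.List.pyRange_one_succ_right (by positivity), List.foldl_append,
        ih (by omega)]
    have hk : k < lista.length := by omega
    have htake : lista.take (k + 1) = lista.take k ++ [lista[k]] := by
      rw [List.take_add_one]; simp [List.getElem?_eq_getElem hk]
    rw [htake, List.foldl_append]
    simp [List.getElem?_eq_getElem hk]

-- ===== VERDICT (by name: the statement is the Claim_ definition above) =====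
theorem suma_valles_spec : Claim_equal_suma_valles := by
  intro n lista _ hpre
  unfold Pre_suma_valles at hpre
  unfold Spec_suma_valles suma_valles suma_valles_alt
  show (List.foldl (fun (st : Int × Int) (i : Int) => svStepA st (PySem.List.pyGetD lista i ""))
          (0, 0) (PySem.List.pyRange 0 n 1)).2
      = svPC (List.foldl svStepB ([0], 0) (PySem.List.slice lista none (some (max n 0)))).1
  have hsl : PySem.List.slice lista none (some (max n 0)) = lista.take n.toNat := by
    rw [PySem.List.slice_to lista (le_max_right n 0)]
    congr 1; omega
  rw [hsl]
  have hfb := svFoldB (lista.take n.toNat) [] 0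
  simp only [List.nil_append] at hfb
  rw [hfb, svPC_scan]
  by_cases hn : 0 ≤ n
  · have hk : n = ((n.toNat : Nat) : Int) := by omega
    rw [show PySem.List.pyRange 0 n 1 = PySem.List.pyRange 0 ((n.toNat : Nat) : Int) 1 from by
          rw [← hk],
        svFoldRange lista n.toNat (by omega), svFoldA]
    simp
  · rw [PySem.List.pyRange_one_eq_nil (by omega)]
    have h0 : n.toNat = 0 := by omega
    rw [h0]
    simp [svCC]
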